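-- pv_equiv track=rewrite | github.com/vanditkanudia/vervestacks-dashboard | 2_ts_design/scripts/stress_period_analyzer.py | _day_index_to_month_day
-- ===== SOURCE A (Python) =====
-- def _day_index_to_month_day(day_index):
--     """Convert day index (0-364) to proper month and day with year wrapping"""
--     days_in_month = [31, 28, 31, 30, 31, 30, 31, 31, 30, 31, 30, 31]
--
--     # Handle year wrapping - if day_index >= 365, wrap to next year
--     day_index = day_index % 365
--
--     cumulative_days = 0
--     for month, days in enumerate(days_in_month, 1):
--         if day_index < cumulative_days + days:
--             day_in_month = day_index - cumulative_days + 1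
--             return month, day_in_month
--         cumulative_days += days
--
--     # Fallback (shouldn't happen with proper modulo)
--     return 12, 31
-- ===== SOURCE B (Python) =====
-- _CUM = [31, 59, 90, 120, 151, 181, 212, 243, 273, 304, 334, 365]
--
-- def _day_index_to_month_day(day_index):
--     """Convert day index (0-364) to (month, day) via binary search on cumulative boundaries"""
--     d = day_index % 365
--     lo, hi = 0, 12
--     while lo < hi:
--         mid = (lo + hi) // 2
--         if d < _CUM[mid]:
--             hi = mid
--         else:
--             lo = mid + 1
--     month = lo + 1
--     day_in_month = d - (_CUM[month - 2] if month > 1 else 0) + 1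
--     return month, day_in_month
-- ===== Notes on version B (the rewrite author's own statement) =====
-- stated objective: alternative
-- what changed: Replaced the linear accumulate-and-compare scan over month lengths with a precomputed cumulative-boundaries table and a binary search for the month, followed by one subtraction for the day.
import Mathlib
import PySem

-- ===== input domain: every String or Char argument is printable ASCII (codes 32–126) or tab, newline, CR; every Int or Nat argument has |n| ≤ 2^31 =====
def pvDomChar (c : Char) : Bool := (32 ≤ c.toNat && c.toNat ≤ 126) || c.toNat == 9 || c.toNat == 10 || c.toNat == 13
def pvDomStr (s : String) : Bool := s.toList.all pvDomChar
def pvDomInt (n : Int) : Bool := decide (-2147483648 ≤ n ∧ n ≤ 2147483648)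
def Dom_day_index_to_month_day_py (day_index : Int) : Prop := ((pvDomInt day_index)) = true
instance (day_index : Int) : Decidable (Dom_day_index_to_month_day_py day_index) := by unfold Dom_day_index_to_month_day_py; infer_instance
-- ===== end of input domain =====

-- B replaces A's linear accumulate-and-compare scan with a precomputed cumulative
-- table and a binary search for the month (alternative algorithm, same cost class).


-- ===== PORT A =====
-- the for-loop over enumerate(days_in_month, 1) with early return
def pvALoop : List Int → Int → Int → Int → Int × Int
  | [], _, _, _ => (12, 31)
  | days :: rest, month, cum, d =>
    if d < cum + days then (month, d - cum + 1)
    else pvALoop rest (month + 1) (cum + days) d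

def pvACore (d : Int) : Int × Int :=
  pvALoop [31, 28, 31, 30, 31, 30, 31, 31, 30, 31, 30, 31] 1 0 d

def day_index_to_month_day_py (day_index : Int) : Int × Int :=
  pvACore (PySem.Int.mod day_index 365)

-- ===== PORT B =====
def pvCum : List Int := [31, 59, 90, 120, 151, 181, 212, 243, 273, 304, 334, 365]

-- the hand-written while-loop binary search of Source B, with a fuel counter making the
-- recursion structural (fuel 12 ≥ hi - lo, which strictly shrinks each iteration, so
-- fuel never runs out; indices are always in range, so the getD default 0 is unused)
def pvBSearch : Nat → Int → Nat → Nat → Nat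
  | 0, _, lo, _ => lo
  | fuel + 1, d, lo, hi =>
    if lo < hi then
      let mid := (lo + hi) / 2
      if d < pvCum.getD mid 0 then pvBSearch fuel d lo mid
      else pvBSearch fuel d (mid + 1) hi
    else lo

def pvBCore (d : Int) : Int × Int :=
  let m := pvBSearch 12 d 0 12
  let month : Int := (m : Int) + 1
  let day_in_month := d - (if m > 0 then pvCum.getD (m - 1) 0 else 0) + 1
  (month, day_in_month)

def day_index_to_month_day_py_alt (day_index : Int) : Int × Int :=
  pvBCore (PySem.Int.mod day_index 365)

-- ===== PRECONDITION & SPEC =====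
def Spec_day_index_to_month_day_py (day_index : Int) (out : Int × Int) : Prop := out = day_index_to_month_day_py_alt day_index
instance (day_index : Int) (out : Int × Int) : Decidable (Spec_day_index_to_month_day_py day_index out) := by unfold Spec_day_index_to_month_day_py; infer_instance

-- ===== CLAIM (what is proved, stated in full; the proofs are below) =====
def Claim_equal_day_index_to_month_day_py : Prop := ∀ (day_index : Int), Dom_day_index_to_month_day_py day_index → Spec_day_index_to_month_day_py day_index (day_index_to_month_day_py day_index)

-- ===== LEMMAS AND PROOFS =====
set_option maxRecDepth 40000 in
theorem pvCore_eq : ∀ n : Fin 365, pvACore (n : Int) = pvBCore (n : Int) := by decide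

theorem pvCore_eq_nat (n : Nat) (h : n < 365) : pvACore (n : Int) = pvBCore (n : Int) :=
  pvCore_eq ⟨n, h⟩

-- ===== VERDICT (by name: the statement is the Claim_ definition above) =====
theorem day_index_to_month_day_py_spec : Claim_equal_day_index_to_month_day_py := by
  intro x _
  unfold Spec_day_index_to_month_day_py day_index_to_month_day_py day_index_to_month_day_py_alt
  have h0 : 0 ≤ PySem.Int.mod x 365 := PySem.Int.mod_nonneg x (by norm_num)
  have h1 : PySem.Int.mod x 365 < 365 := PySem.Int.mod_lt x (by norm_num)
  have hn : ((PySem.Int.mod x 365).toNat : Int) = PySem.Int.mod x 365 := Int.toNat_of_nonneg h0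
  have hlt : (PySem.Int.mod x 365).toNat < 365 := by omega
  have key := pvCore_eq_nat _ hlt
  rw [hn] at key
  exact key
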